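-- pv_equiv track=rewrite | github.com/Kurpilyansky/AoC2019 | 17/17.py | calc_alignment_params
-- ===== SOURCE A (Python) =====
-- def calc_alignment_params(n, m, image):
--   res = 0
--   for x in range(n):
--     for y in range(m):
--       if image[x][y] == '.':
--         continue
--       count = 0
--       if x != 0 and image[x - 1][y] != '.':
--         count += 1
--       if y != 0 and image[x][y - 1] != '.':
--         count += 1
--       if x != n - 1 and image[x + 1][y] != '.':
--         count += 1
--       if y != m - 1 and image[x][y + 1] != '.':
--         count += 1
--       if count >= 3:
--         res += x * y
--   return res
-- ===== SOURCE B (Python) =====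
-- def calc_alignment_params(n, m, image):
--   # Edge-based: collect one incidence entry per endpoint of every
--   # scaffold-scaffold adjacency, tally degrees in a dict, then sum x*y
--   # over scaffold cells of degree >= 3.
--   incs = []
--   for x in range(n):
--     for y in range(m):
--       if image[x][y] != '.':
--         if y + 1 < m and image[x][y + 1] != '.':
--           incs.append((x, y))
--           incs.append((x, y + 1))
--         if x + 1 < n and image[x + 1][y] != '.':
--           incs.append((x, y))
--           incs.append((x + 1, y))
--   deg = {}
--   for c in incs:
--     deg[c] = deg.get(c, 0) + 1
--   res = 0
--   for x in range(n):
--     for y in range(m):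
--       if image[x][y] != '.' and deg.get((x, y), 0) >= 3:
--         res += x * y
--   return res
-- ===== Notes on version B (the rewrite author's own statement) =====
-- stated objective: alternative
-- what changed: Replaces A's vertex-centric four-direction neighbour counting inside one pass by an edge-based algorithm: a first pass emits two incidence entries per horizontally/vertically adjacent scaffold pair, a dict tallies them into degrees, and a separate pass sums x*y over scaffold cells of degree >= 3.
import Mathlib
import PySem

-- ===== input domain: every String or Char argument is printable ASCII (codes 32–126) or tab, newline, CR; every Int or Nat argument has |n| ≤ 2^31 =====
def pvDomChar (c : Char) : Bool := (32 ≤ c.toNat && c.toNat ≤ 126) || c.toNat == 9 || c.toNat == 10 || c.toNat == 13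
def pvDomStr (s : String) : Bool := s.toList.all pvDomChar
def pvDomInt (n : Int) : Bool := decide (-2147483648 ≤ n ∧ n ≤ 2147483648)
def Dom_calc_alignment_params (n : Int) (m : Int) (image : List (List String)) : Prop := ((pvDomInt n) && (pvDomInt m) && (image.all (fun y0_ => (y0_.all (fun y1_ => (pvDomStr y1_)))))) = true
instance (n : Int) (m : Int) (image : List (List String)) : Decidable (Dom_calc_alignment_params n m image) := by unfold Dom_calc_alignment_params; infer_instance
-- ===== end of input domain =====

-- B replaces A's vertex-centric four-direction neighbour counting by an edge-based
-- decomposition (incidence list of adjacent scaffold pairs, degree tally in a dict,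
-- separate summing pass); alternative structure, same asymptotic cost.

-- ===== PORT A =====
-- shared indexing helper: image[x][y] (the defaults are only reachable outside Pre_)
def pvCell (image : List (List String)) (x y : Int) : String :=
  PySem.List.pyGetD (PySem.List.pyGetD image x []) y ""

def calc_alignment_params (n : Int) (m : Int) (image : List (List String)) : Int :=
  (PySem.List.pyRange 0 n 1).foldl (fun res x =>
    (PySem.List.pyRange 0 m 1).foldl (fun res y =>
      if pvCell image x y = "." then res
      else
        let count : Int := 0
        let count := if x ≠ 0 ∧ pvCell image (x-1) y ≠ "." then count + 1 else count
        let count := if y ≠ 0 ∧ pvCell image x (y-1) ≠ "." then count + 1 else count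
        let count := if x ≠ n-1 ∧ pvCell image (x+1) y ≠ "." then count + 1 else count
        let count := if y ≠ m-1 ∧ pvCell image x (y+1) ≠ "." then count + 1 else count
        if count ≥ 3 then res + x * y else res) res) 0

-- ===== PORT B =====
-- phase 1 of Source B: the incidence list 'incs'
def pvIncs (n : Int) (m : Int) (image : List (List String)) : List (Int × Int) :=
  (PySem.List.pyRange 0 n 1).foldl (fun acc x =>
    (PySem.List.pyRange 0 m 1).foldl (fun acc y =>
      if pvCell image x y ≠ "." then
        let acc := if y + 1 < m ∧ pvCell image x (y+1) ≠ "." then acc ++ [(x, y)] ++ [(x, y+1)] else acc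
        let acc := if x + 1 < n ∧ pvCell image (x+1) y ≠ "." then acc ++ [(x, y)] ++ [(x+1, y)] else acc
        acc
      else acc) acc) []

-- phase 2 of Source B: the degree dict 'deg'
def pvDeg (n : Int) (m : Int) (image : List (List String)) : PySem.Dict (Int × Int) Int :=
  (pvIncs n m image).foldl (fun d c => d.insert c (d.getD c 0 + 1)) PySem.Dict.empty

def calc_alignment_params_alt (n : Int) (m : Int) (image : List (List String)) : Int :=
  let deg := pvDeg n m image
  (PySem.List.pyRange 0 n 1).foldl (fun res x =>
    (PySem.List.pyRange 0 m 1).foldl (fun res y =>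
      if pvCell image x y ≠ "." ∧ deg.getD (x, y) 0 ≥ 3 then res + x * y else res) res) 0

-- ===== PRECONDITION & SPEC =====
-- Pre_ excludes exactly the inputs on which Python A raises IndexError: when both
-- loops run (0 < n and 0 < m), the image needs at least n rows and each of the
-- first n rows at least m entries.
def Pre_calc_alignment_params (n : Int) (m : Int) (image : List (List String)) : Prop :=
  0 < n → 0 < m → (n ≤ (image.length : Int) ∧ ∀ row ∈ image.take n.toNat, m ≤ (row.length : Int))
instance (n : Int) (m : Int) (image : List (List String)) : Decidable (Pre_calc_alignment_params n m image) := by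
  unfold Pre_calc_alignment_params; infer_instance

def pvWitness_calc_alignment_params : Int × Int × List (List String) :=
  (3, 3, [["#", "#", "#"], [".", "#", "."], ["#", "#", "#"]])

def Spec_calc_alignment_params (n : Int) (m : Int) (image : List (List String)) (out : Int) : Prop := out = calc_alignment_params_alt n m image
instance (n : Int) (m : Int) (image : List (List String)) (out : Int) : Decidable (Spec_calc_alignment_params n m image out) := by unfold Spec_calc_alignment_params; infer_instance

-- ===== CLAIM (what is proved, stated in full; the proofs are below) =====
def Claim_equal_calc_alignment_params : Prop := ∀ (n : Int) (m : Int) (image : List (List String)), Dom_calc_alignment_params n m image → Pre_calc_alignment_params n m image → Spec_calc_alignment_params n m image (calc_alignment_params n m image)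

-- ===== LEMMAS AND PROOFS =====

-- horizontal / vertical scaffold-adjacency indicators (edges (a,b)-(a,b+1) and (a,b)-(a+1,b))
def pvHE (m : Int) (image : List (List String)) (a b : Int) : Nat :=
  if pvCell image a b ≠ "." ∧ b + 1 < m ∧ pvCell image a (b+1) ≠ "." then 1 else 0
def pvVE (n : Int) (image : List (List String)) (a b : Int) : Nat :=
  if pvCell image a b ≠ "." ∧ a + 1 < n ∧ pvCell image (a+1) b ≠ "." then 1 else 0

-- the two incidence entries cell (x, y) appends to incs for each of its edges
def pvContrib (n m : Int) (image : List (List String)) (x y : Int) : List (Int × Int) :=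
  if pvCell image x y ≠ "." then
    (if y + 1 < m ∧ pvCell image x (y+1) ≠ "." then [(x, y), (x, y+1)] else []) ++
    (if x + 1 < n ∧ pvCell image (x+1) y ≠ "." then [(x, y), (x+1, y)] else [])
  else []

theorem pvStep (n m : Int) (image : List (List String)) (x y : Int) (acc : List (Int × Int)) :
    (if pvCell image x y ≠ "." then
        let acc := if y + 1 < m ∧ pvCell image x (y+1) ≠ "." then acc ++ [(x, y)] ++ [(x, y+1)] else acc
        let acc := if x + 1 < n ∧ pvCell image (x+1) y ≠ "." then acc ++ [(x, y)] ++ [(x+1, y)] else acc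
        acc
      else acc) = acc ++ pvContrib n m image x y := by
  unfold pvContrib; dsimp only; split_ifs <;> simp

theorem pvIncs_eq_flatMap (n m : Int) (image : List (List String)) :
    pvIncs n m image =
      (PySem.List.pyRange 0 n 1).flatMap (fun x =>
        (PySem.List.pyRange 0 m 1).flatMap (fun y => pvContrib n m image x y)) := by
  unfold pvIncs
  simp only [pvStep, PySem.List.foldl_append_eq_flatMap]
  simp

theorem count_flatMap {α β : Type} [BEq β] (l : List α) (g : α → List β) (p : β) :
    ((l.flatMap g).count p) = (l.map (fun a => (g a).count p)).sum := by
  induction l with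
  | nil => simp
  | cons a t ih => simp [List.count_append, ih]

theorem sum_map_add_nat {α : Type} (l : List α) (f g : α → Nat) :
    (l.map (fun a => f a + g a)).sum = (l.map f).sum + (l.map g).sum := by
  induction l with
  | nil => simp
  | cons a t ih => simp [ih]; omega

theorem sum_map_delta {α : Type} [DecidableEq α] (l : List α) (hl : l.Nodup) (p : α) (k : Nat) :
    (l.map (fun q => if q = p then k else 0)).sum = if p ∈ l then k else 0 := by
  induction l with
  | nil => simp
  | cons a t ih =>
    rcases List.nodup_cons.mp hl with ⟨ha, ht⟩
    by_cases h : a = p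
    · subst h; simp [ih ht, ha]
    · simp [h, ih ht, Ne.symm h]

-- cell (a, b) contributes an incidence entry for (x, y) only from the three
-- possible edges whose endpoint (x, y) is: its own right/down edge, the right
-- edge of (x, y-1), or the down edge of (x-1, y)
set_option maxHeartbeats 2000000 in
theorem count_contrib (n m : Int) (image : List (List String)) (x y a b : Int) :
    (pvContrib n m image a b).count (x, y) =
      (if (a, b) = (x, y) then pvHE m image x y + pvVE n image x y else 0)
      + (if (a, b) = (x, y-1) then pvHE m image x (y-1) else 0)
      + (if (a, b) = (x-1, y) then pvVE n image (x-1) y else 0) := by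
  unfold pvContrib pvHE pvVE
  split_ifs <;>
    simp_all [List.count_cons, List.count_nil, Prod.mk.injEq] <;>
    omega

theorem pvInnerSum (n m : Int) (image : List (List String)) (x y a : Int)
    (hy0 : 0 ≤ y) (hym : y < m) :
    ((PySem.List.pyRange 0 m 1).map (fun b => (pvContrib n m image a b).count (x, y))).sum
      = (if a = x then pvHE m image x y + pvVE n image x y else 0)
      + ((if a = x then (if 0 ≤ y - 1 then pvHE m image x (y-1) else 0) else 0)
      + (if a = x - 1 then pvVE n image (x-1) y else 0)) := by
  rw [List.map_congr_left (fun b _ => count_contrib n m image x y a b)]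
  rw [List.map_congr_left (g := fun b =>
      (if b = y then (if a = x then pvHE m image x y + pvVE n image x y else 0) else 0)
      + ((if b = y - 1 then (if a = x then pvHE m image x (y-1) else 0) else 0)
      + (if b = y then (if a = x - 1 then pvVE n image (x-1) y else 0) else 0)))]
  · rw [sum_map_add_nat, sum_map_add_nat,
      sum_map_delta _ (PySem.List.nodup_pyRange_one 0 m),
      sum_map_delta _ (PySem.List.nodup_pyRange_one 0 m),
      sum_map_delta _ (PySem.List.nodup_pyRange_one 0 m)]
    simp [PySem.List.mem_pyRange_one, hy0, hym]
    split_ifs <;> omega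
  · intro b _
    by_cases hb1 : b = y <;> by_cases hb2 : b = y - 1 <;> by_cases hax : a = x <;>
      by_cases hax1 : a = x - 1 <;> simp_all [Prod.mk.injEq]

-- an in-range scaffold cell's degree in incs is exactly A's neighbour count
theorem count_incs (n m : Int) (image : List (List String)) (x y : Int)
    (hx0 : 0 ≤ x) (hxn : x < n) (hy0 : 0 ≤ y) (hym : y < m)
    (hc : pvCell image x y ≠ ".") :
    (((pvIncs n m image).count (x, y) : Nat) : Int) =
      (if x ≠ 0 ∧ pvCell image (x-1) y ≠ "." then 1 else 0)
      + (if y ≠ 0 ∧ pvCell image x (y-1) ≠ "." then 1 else 0)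
      + (if x ≠ n-1 ∧ pvCell image (x+1) y ≠ "." then 1 else 0)
      + (if y ≠ m-1 ∧ pvCell image x (y+1) ≠ "." then 1 else 0) := by
  rw [pvIncs_eq_flatMap]
  rw [count_flatMap]
  simp only [count_flatMap]
  rw [List.map_congr_left (fun a _ => pvInnerSum n m image x y a hy0 hym)]
  rw [sum_map_add_nat, sum_map_add_nat,
     sum_map_delta _ (PySem.List.nodup_pyRange_one 0 n),
     sum_map_delta _ (PySem.List.nodup_pyRange_one 0 n),
     sum_map_delta _ (PySem.List.nodup_pyRange_one 0 n)]
  by_cases cu : pvCell image (x-1) y = "." <;> by_cases cl : pvCell image x (y-1) = "." <;>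
  by_cases cd : pvCell image (x+1) y = "." <;> by_cases cr : pvCell image x (y+1) = "." <;>
    simp [pvHE, pvVE, PySem.List.mem_pyRange_one, hc, cu, cl, cd, cr, sub_add_cancel,
      hx0, hxn, hym] <;>
    split_ifs <;> omega

theorem deg_getD (n m : Int) (image : List (List String)) (c : Int × Int) :
    (pvDeg n m image).getD c 0 = ((pvIncs n m image).count c : Int) := by
  unfold pvDeg
  rw [PySem.Dict.getD_foldl_insert_add_one]
  simp [PySem.Dict.getD_empty]

-- ===== VERDICT (by name: the statement is the Claim_ definition above) =====
theorem calc_alignment_params_spec : Claim_equal_calc_alignment_params := by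
  intro n m image _ _
  unfold Spec_calc_alignment_params calc_alignment_params calc_alignment_params_alt
  dsimp only
  refine PySem.List.foldl_congr_mem _ _ _ _ ?_
  intro res x hx
  refine PySem.List.foldl_congr_mem _ _ _ _ ?_
  intro res y hy
  obtain ⟨hx0, hxn⟩ := (PySem.List.mem_pyRange_one).mp hx
  obtain ⟨hy0, hym⟩ := (PySem.List.mem_pyRange_one).mp hy
  by_cases hc : pvCell image x y = "."
  · simp [hc]
  · have hdeg : (pvDeg n m image).getD (x, y) 0 =
        (if x ≠ 0 ∧ pvCell image (x-1) y ≠ "." then 1 else 0)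
        + (if y ≠ 0 ∧ pvCell image x (y-1) ≠ "." then 1 else 0)
        + (if x ≠ n-1 ∧ pvCell image (x+1) y ≠ "." then 1 else 0)
        + (if y ≠ m-1 ∧ pvCell image x (y+1) ≠ "." then 1 else 0) := by
      rw [deg_getD]; exact count_incs n m image x y hx0 hxn hy0 hym hc
    rw [if_neg hc, hdeg]
    simp only [hc, ne_eq, not_false_iff, true_and]
    split_ifs <;> omega
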